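-- pv_equiv track=rewrite | github.com/NTC223/DataWarehouse | be/app/services/olap_router.py | map_columns_to_dimensions
-- ===== SOURCE A (Python) =====
-- from typing import List, Dict, Set, Tuple, Optional, Any, FrozenSet
--
-- DIMENSION_COLUMNS = {
--     "time": ["year", "quarter", "month"],
--     "product": ["product_key"],
--     "customer": ["customer_type", "customer_key", "state", "city"],
--     "store": ["store_key"],
-- }
--
-- def map_columns_to_dimensions(columns: List[str]) -> Set[str]:
--     """
--     Ánh xạ từ danh sách cột sang các dimension.
--
--     Args:
--         columns: List tên cột (VD: ["year", "product_key"])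
--
--     Returns:
--         Set các dimension (VD: {"time", "product"})
--     """
--     dimensions = set()
--
--     for col in columns:
--         for dim, dim_cols in DIMENSION_COLUMNS.items():
--             if col in dim_cols:
--                 dimensions.add(dim)
--                 break
--
--     return dimensions
-- ===== SOURCE B (Python) =====
-- from typing import List, Dict, Set, Tuple, Optional, Any, FrozenSet
--
-- DIMENSION_COLUMNS = {
--     "time": ["year", "quarter", "month"],
--     "product": ["product_key"],
--     "customer": ["customer_type", "customer_key", "state", "city"],
--     "store": ["store_key"],
-- }
--
-- # reverse index built once: column name -> dimension name
-- _COLUMN_TO_DIM = {col: dim for dim, cols in DIMENSION_COLUMNS.items() for col in cols}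
--
-- def map_columns_to_dimensions(columns: List[str]) -> Set[str]:
--     return {_COLUMN_TO_DIM[col] for col in columns if col in _COLUMN_TO_DIM}
-- ===== Notes on version B (the rewrite author's own statement) =====
-- stated objective: faster
-- what changed: Replaces the per-column inner scan over DIMENSION_COLUMNS (with break) by a reverse column->dimension index built once at module load and a single-pass set comprehension over the input.
import Mathlib
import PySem

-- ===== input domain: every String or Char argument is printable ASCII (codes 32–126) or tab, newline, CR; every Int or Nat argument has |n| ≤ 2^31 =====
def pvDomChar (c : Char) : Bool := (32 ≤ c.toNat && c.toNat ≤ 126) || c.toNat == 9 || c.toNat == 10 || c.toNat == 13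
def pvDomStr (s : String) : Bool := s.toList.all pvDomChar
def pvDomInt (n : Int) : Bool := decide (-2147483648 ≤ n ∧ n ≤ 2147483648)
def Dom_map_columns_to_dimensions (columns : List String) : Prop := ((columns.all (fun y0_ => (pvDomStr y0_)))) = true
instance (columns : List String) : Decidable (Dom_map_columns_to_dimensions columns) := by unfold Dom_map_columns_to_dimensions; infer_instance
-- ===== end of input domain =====

-- B replaces A's per-column inner scan (with break) by a reverse column->dimension index built once plus a single-pass set comprehension (objective: simpler).

-- ===== PORT A =====
def pvDIM : List (String × List String) :=
  [("time", ["year", "quarter", "month"]),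
   ("product", ["product_key"]),
   ("customer", ["customer_type", "customer_key", "state", "city"]),
   ("store", ["store_key"])]

-- inner 'for dim, dim_cols in DIMENSION_COLUMNS.items(): if col in dim_cols: add; break'
def pvInnerA (col : String) (s : PySem.Set String) : List (String × List String) → PySem.Set String
  | [] => s
  | (dim, cols) :: rest => if col ∈ cols then PySem.Set.add s dim else pvInnerA col s rest

def map_columns_to_dimensions (columns : List String) : List String :=
  columns.foldl (fun s col => pvInnerA col s pvDIM) PySem.Set.empty

-- ===== PORT B =====
-- _COLUMN_TO_DIM = {col: dim for dim, cols in DIMENSION_COLUMNS.items() for col in cols}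
def pvCol2Dim : PySem.Dict String String :=
  pvDIM.foldl (fun d p => p.2.foldl (fun d c => d.insert c p.1) d) PySem.Dict.empty

def map_columns_to_dimensions_alt (columns : List String) : List String :=
  columns.foldl (fun s col =>
    match pvCol2Dim.get? col with
    | some dim => PySem.Set.add s dim
    | none => s) PySem.Set.empty

-- ===== PRECONDITION & SPEC =====
def Spec_map_columns_to_dimensions (columns : List String) (out : List String) : Prop := out = map_columns_to_dimensions_alt columns
instance (columns : List String) (out : List String) : Decidable (Spec_map_columns_to_dimensions columns out) := by unfold Spec_map_columns_to_dimensions; infer_instance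

-- ===== CLAIM (what is proved, stated in full; the proofs are below) =====
def Claim_equal_map_columns_to_dimensions : Prop := ∀ (columns : List String), Dom_map_columns_to_dimensions columns → Spec_map_columns_to_dimensions columns (map_columns_to_dimensions columns)

-- ===== LEMMAS AND PROOFS =====

-- the per-column step of A equals the per-column step of B, for every column string
theorem pv_step_eq (col : String) (s : PySem.Set String) :
    pvInnerA col s pvDIM =
      (match pvCol2Dim.get? col with
       | some dim => PySem.Set.add s dim
       | none => s) := by
  by_cases h1 : col = "year"
  · subst h1; rfl
  by_cases h2 : col = "quarter"
  · subst h2; rfl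
  by_cases h3 : col = "month"
  · subst h3; rfl
  by_cases h4 : col = "product_key"
  · subst h4; rfl
  by_cases h5 : col = "customer_type"
  · subst h5; rfl
  by_cases h6 : col = "customer_key"
  · subst h6; rfl
  by_cases h7 : col = "state"
  · subst h7; rfl
  by_cases h8 : col = "city"
  · subst h8; rfl
  by_cases h9 : col = "store_key"
  · subst h9; rfl
  have g1 : ("year" == col) = false := by rw [beq_eq_false_iff_ne]; exact fun e => h1 e.symm
  have g2 : ("quarter" == col) = false := by rw [beq_eq_false_iff_ne]; exact fun e => h2 e.symm
  have g3 : ("month" == col) = false := by rw [beq_eq_false_iff_ne]; exact fun e => h3 e.symm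
  have g4 : ("product_key" == col) = false := by rw [beq_eq_false_iff_ne]; exact fun e => h4 e.symm
  have g5 : ("customer_type" == col) = false := by rw [beq_eq_false_iff_ne]; exact fun e => h5 e.symm
  have g6 : ("customer_key" == col) = false := by rw [beq_eq_false_iff_ne]; exact fun e => h6 e.symm
  have g7 : ("state" == col) = false := by rw [beq_eq_false_iff_ne]; exact fun e => h7 e.symm
  have g8 : ("city" == col) = false := by rw [beq_eq_false_iff_ne]; exact fun e => h8 e.symm
  have g9 : ("store_key" == col) = false := by rw [beq_eq_false_iff_ne]; exact fun e => h9 e.symm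
  simp [pvInnerA, pvDIM, pvCol2Dim, PySem.Dict.get?, PySem.Dict.insert, PySem.Dict.empty, List.find?, g1, g2, g3, g4, g5, g6, g7, g8, g9, h1, h2, h3, h4, h5, h6, h7, h8, h9]

-- ===== VERDICT (by name: the statement is the Claim_ definition above) =====
theorem map_columns_to_dimensions_spec : Claim_equal_map_columns_to_dimensions := by
  intro columns _
  show _ = _
  unfold map_columns_to_dimensions map_columns_to_dimensions_alt
  rw [show (fun (s : PySem.Set String) col => pvInnerA col s pvDIM)
        = (fun (s : PySem.Set String) col =>
            match pvCol2Dim.get? col with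
            | some dim => PySem.Set.add s dim
            | none => s)
      from funext fun s => funext fun col => pv_step_eq col s]
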